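-- pv_equiv track=rewrite | github.com/abhayr2/RISC-V-Explorer-Task | tier2_crossref.py | crossref
-- ===== SOURCE A (Python) =====
-- def normalize_ext(name: str) -> str:
--     """rv_zba -> zba, Zba -> zba, M -> m"""
--     name = name.strip().lower()
--     if name.startswith("rv_"):
--         name = name[3:]
--     return name
--
-- def crossref(json_ext_map: dict, manual_exts: set) -> dict:
--     json_norm = {normalize_ext(k) for k in json_ext_map}
--     matched    = json_norm & manual_exts
--     json_only  = json_norm - manual_exts
--     manual_only = manual_exts - json_norm
--     return {
--         "matched":     matched,
--         "json_only":   json_only,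
--         "manual_only": manual_only,
--     }
-- ===== SOURCE B (Python) =====
-- def normalize_ext(name: str) -> str:
--     name = name.strip().lower()
--     if name.startswith("rv_"):
--         name = name[3:]
--     return name
--
-- def crossref(json_ext_map: dict, manual_exts: set) -> dict:
--     # One merged tagging dict: bit 1 = seen in json, bit 2 = seen in manual,
--     # then a single classification pass over the tags.
--     status = {}
--     for k in json_ext_map:
--         status[normalize_ext(k)] = 1
--     for m in manual_exts:
--         status[m] = status.get(m, 0) | 2
--     matched, json_only, manual_only = set(), set(), set()
--     for name, tag in status.items():
--         if tag == 3:
--             matched.add(name)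
--         elif tag == 1:
--             json_only.add(name)
--         else:
--             manual_only.add(name)
--     return {"matched": matched, "json_only": json_only, "manual_only": manual_only}
-- ===== Notes on version B (the rewrite author's own statement) =====
-- stated objective: alternative
-- what changed: Instead of building json_norm and applying three set-algebra operations (&, -, -), B merges both inputs into one tagging dict (bit 1 = in json, bit 2 = in manual) and does a single classification pass over the tags to produce the three sets.
import Mathlib
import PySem

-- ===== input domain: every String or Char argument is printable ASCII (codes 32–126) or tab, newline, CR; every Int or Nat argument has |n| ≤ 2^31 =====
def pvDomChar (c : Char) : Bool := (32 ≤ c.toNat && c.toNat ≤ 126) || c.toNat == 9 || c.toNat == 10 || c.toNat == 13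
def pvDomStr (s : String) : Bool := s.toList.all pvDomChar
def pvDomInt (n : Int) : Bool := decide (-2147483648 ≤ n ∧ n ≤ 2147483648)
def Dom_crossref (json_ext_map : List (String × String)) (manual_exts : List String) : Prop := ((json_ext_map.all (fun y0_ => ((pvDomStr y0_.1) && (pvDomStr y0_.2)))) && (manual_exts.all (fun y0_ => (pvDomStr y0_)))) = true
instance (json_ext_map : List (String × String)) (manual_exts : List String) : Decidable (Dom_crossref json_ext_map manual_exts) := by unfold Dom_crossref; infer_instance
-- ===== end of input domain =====

-- B replaces A's set algebra (&, -, -) on json_norm by one merged tagging dict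
-- (bit 1 = in json, bit 2 = in manual) and a single classification pass over the tags
-- (alternative decomposition; same cost).

-- ===== PORT A =====
def normalize_ext (name : String) : String :=
  let name := PySem.Str.lower (PySem.Str.strip name)
  if PySem.Str.startswith name "rv_" then PySem.Str.slice name (some 3) none else name

def crossref (json_ext_map : List (String × String)) (manual_exts : List String) : List (String × List String) :=
  let json_norm : PySem.Set String := PySem.Set.ofList (json_ext_map.map (fun kv => normalize_ext kv.1))
  let matched := PySem.Set.inter json_norm manual_exts
  let json_only := PySem.Set.diff json_norm manual_exts
  let manual_only := PySem.Set.diff manual_exts json_norm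
  [("matched", matched), ("json_only", json_only), ("manual_only", manual_only)]

-- ===== PORT B =====
def normExt (name : String) : String :=
  let name := PySem.Str.lower (PySem.Str.strip name)
  if PySem.Str.startswith name "rv_" then PySem.Str.slice name (some 3) none else name

def crossref_alt (json_ext_map : List (String × String)) (manual_exts : List String) : List (String × List String) :=
  let status1 : PySem.Dict String Int :=
    json_ext_map.foldl (fun d kv => d.insert (normExt kv.1) 1) PySem.Dict.empty
  let status : PySem.Dict String Int :=
    manual_exts.foldl (fun d m => d.insert m (PySem.Int.bor (d.getD m 0) 2)) status1
  let acc := status.items.foldl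
    (fun (acc : List String × List String × List String) it =>
      if it.2 == 3 then (PySem.Set.add acc.1 it.1, acc.2.1, acc.2.2)
      else if it.2 == 1 then (acc.1, PySem.Set.add acc.2.1 it.1, acc.2.2)
      else (acc.1, acc.2.1, PySem.Set.add acc.2.2 it.1))
    (([] : List String), ([] : List String), ([] : List String))
  [("matched", acc.1), ("json_only", acc.2.1), ("manual_only", acc.2.2)]

-- ===== PRECONDITION & SPEC =====
-- manual_exts is a Python set, so its List String encoding holds distinct elements;
-- a list with duplicates does not represent any Python input of A.
def Pre_crossref (json_ext_map : List (String × String)) (manual_exts : List String) : Prop :=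
  manual_exts.Nodup
instance (json_ext_map : List (String × String)) (manual_exts : List String) : Decidable (Pre_crossref json_ext_map manual_exts) := by unfold Pre_crossref; infer_instance

def pvWitness_crossref : (List (String × String)) × List String :=
  ([("RV_Zba", "bit manip"), ("M", "mul")], ["zba", "c"])

def Spec_crossref (json_ext_map : List (String × String)) (manual_exts : List String) (out : List (String × List String)) : Prop := out = crossref_alt json_ext_map manual_exts
instance (json_ext_map : List (String × String)) (manual_exts : List String) (out : List (String × List String)) : Decidable (Spec_crossref json_ext_map manual_exts out) := by unfold Spec_crossref; infer_instance

-- ===== CLAIM (what is proved, stated in full; the proofs are below) =====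
def Claim_equal_crossref : Prop := ∀ (json_ext_map : List (String × String)) (manual_exts : List String), Dom_crossref json_ext_map manual_exts → Pre_crossref json_ext_map manual_exts → Spec_crossref json_ext_map manual_exts (crossref json_ext_map manual_exts)

-- ===== LEMMAS AND PROOFS =====

-- B's first loop builds exactly the dict whose keys are json_norm (first-insertion order)
-- and whose values are all 1.
theorem first_loop_items (l s : List String) :
    l.foldl (fun d x => PySem.Dict.insert d x (1 : Int))
        (PySem.Dict.mk (s.map (fun k => (k, (1 : Int)))))
      = PySem.Dict.mk ((l.foldl PySem.Set.add s).map (fun k => (k, (1 : Int)))) := by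
  induction l generalizing s with
  | nil => simp
  | cons x t ih =>
    have hstep : PySem.Dict.insert (PySem.Dict.mk (s.map (fun k => (k, (1:Int))))) x 1
        = PySem.Dict.mk ((PySem.Set.add s x).map (fun k => (k, (1:Int)))) := by
      by_cases hx : x ∈ s
      · have hc : (PySem.Dict.mk (s.map (fun k => (k, (1:Int))))).contains x = true := by
          simp [PySem.Dict.contains, List.any_map, Function.comp, hx]
        have hadd : PySem.Set.add s x = s := PySem.Set.add_of_mem hx
        simp only [PySem.Dict.insert, hc, if_true, hadd]
        congr 1
        rw [List.map_map]
        apply List.map_congr_left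
        intro k hk
        by_cases hkx : k = x
        · subst hkx; simp
        · simp [Function.comp, hkx]
      · have hc : (PySem.Dict.mk (s.map (fun k => (k, (1:Int))))).contains x = false := by
          simp [PySem.Dict.contains, List.any_map, Function.comp]
          intro y hy hyx; exact hx (hyx ▸ hy)
        have hadd : PySem.Set.add s x = s ++ [x] := PySem.Set.add_of_not_mem hx
        simp only [PySem.Dict.insert, hc, Bool.false_eq_true, if_false, hadd]
        simp
    rw [List.foldl_cons, hstep, ih, List.foldl_cons]

-- find? by key on a dict built by mapping values over distinct-ish keys finds the key's value.
theorem find?_key_map_of_mem (J : List String) (v : String → Int) (x : String) (hx : x ∈ J) :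
    List.find? (fun q => q.1 == x) (J.map (fun k => (k, v k))) = some (x, v x) := by
  induction J with
  | nil => cases hx
  | cons y t ih =>
    by_cases hyx : y = x
    · subst hyx; simp
    · have hxt : x ∈ t := by
        cases hx with
        | head => exact absurd rfl hyx
        | tail _ h => exact h
      simpa [List.find?_cons, hyx] using ih hxt

-- B's second loop (manual nodup): it turns the value of manual keys already present from 1
-- into 3 and appends (m, 2) for manual-only keys.
theorem second_loop_items (J : List String) (manual : List String) (hm : manual.Nodup) :
    manual.foldl (fun d m => PySem.Dict.insert d m (PySem.Int.bor (d.getD m 0) 2))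
        (PySem.Dict.mk (J.map (fun k => (k, (1 : Int)))))
      = PySem.Dict.mk
          (J.map (fun k => (k, if manual.contains k then (3 : Int) else 1))
            ++ (manual.filter (fun m => !(J.contains m))).map (fun k => (k, (2 : Int)))) := by
  induction manual using List.reverseRecOn with
  | nil => simp
  | append_singleton p x ih =>
    have hpn : p.Nodup := hm.sublist (List.sublist_append_left p [x])
    have hxp : x ∉ p := by
      have := List.disjoint_of_nodup_append hm
      intro h; exact this h (by simp)
    rw [List.foldl_append, ih hpn, List.foldl_cons, List.foldl_nil]
    set dpItems := (J.map (fun k => (k, if p.contains k then (3:Int) else 1))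
        ++ (p.filter (fun m => !(J.contains m))).map (fun k => (k, (2 : Int)))) with hdp
    by_cases hxJ : x ∈ J
    · -- x already a key (from json): getD = 1, overwrite to 3
      have hget : (PySem.Dict.mk dpItems).get? x = some 1 := by
        rw [hdp]
        simp [PySem.Dict.get?, List.find?_append, find?_key_map_of_mem J _ x hxJ,
          List.contains_eq_mem, hxp]
      have hgetD : (PySem.Dict.mk dpItems).getD x 0 = 1 := by
        simp [PySem.Dict.getD, hget]
      have hcont : (PySem.Dict.mk dpItems).contains x = true := by
        rw [PySem.Dict.contains_eq_isSome_get?, hget]; rfl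
      have hbor : PySem.Int.bor 1 2 = 3 := by decide
      rw [hgetD, hbor]
      simp only [PySem.Dict.insert, hcont, if_true]
      congr 1
      rw [hdp, List.map_append]
      congr 1
      · rw [List.map_map]
        apply List.map_congr_left
        intro k hk
        by_cases hkx : k = x
        · subst hkx; simp
        · simp [Function.comp, hkx, List.contains_eq_mem]
      · rw [List.filter_append]
        have : [x].filter (fun m => !(J.contains m)) = [] := by
          simp [List.contains_eq_mem, hxJ]
        rw [this, List.append_nil, List.map_map]
        apply List.map_congr_left
        intro k hk
        have hkJ : k ∉ J := by
          have := List.of_mem_filter hk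
          simpa [List.contains_eq_mem] using this
        have hkx : ¬(k = x) := fun h => hkJ (h ▸ hxJ)
        simp [Function.comp, hkx]
    · -- x not a json key: getD = 0, append (x, 2)
      have hget : (PySem.Dict.mk dpItems).get? x = none := by
        rw [hdp]
        simp only [PySem.Dict.get?, List.find?_append]
        have h1 : List.find? (fun q => q.1 == x) (J.map fun k => (k, if p.contains k then (3:Int) else 1)) = none := by
          rw [List.find?_eq_none]
          intro q hq
          rcases List.mem_map.mp hq with ⟨k, hk, rfl⟩
          intro h
          have hkx : k = x := by simpa using h
          exact hxJ (hkx ▸ hk)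
        have h2 : List.find? (fun q => q.1 == x) ((p.filter (fun m => !(J.contains m))).map fun k => (k, (2:Int))) = none := by
          rw [List.find?_eq_none]
          intro q hq
          rcases List.mem_map.mp hq with ⟨k, hk, rfl⟩
          have : k ∈ p := List.mem_of_mem_filter hk
          intro h
          have hkx : k = x := by simpa using h
          exact hxp (hkx ▸ this)
        rw [h1, h2]; rfl
      have hgetD : (PySem.Dict.mk dpItems).getD x 0 = 0 := by
        simp [PySem.Dict.getD, hget]
      have hcont : (PySem.Dict.mk dpItems).contains x = false := by
        rw [PySem.Dict.contains_eq_isSome_get?, hget]; rfl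
      have hbor : PySem.Int.bor 0 2 = 2 := by decide
      rw [hgetD, hbor]
      simp only [PySem.Dict.insert, hcont, Bool.false_eq_true, if_false]
      congr 1
      rw [hdp]
      have hfilt : (p ++ [x]).filter (fun m => !(J.contains m)) = p.filter (fun m => !(J.contains m)) ++ [x] := by
        simp [List.filter_append, List.contains_eq_mem, hxJ]
      have hmapJ : (J.map (fun k => (k, if (p ++ [x]).contains k then (3:Int) else 1)))
          = J.map (fun k => (k, if p.contains k then (3:Int) else 1)) := by
        apply List.map_congr_left
        intro k hk
        have hkx : ¬(k = x) := fun h => hxJ (h ▸ hk)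
        simp [List.contains_eq_mem, hkx]
      rw [hfilt, hmapJ, List.map_append, List.append_assoc]
      rfl

-- B's classifying fold over items with distinct keys, with accumulators disjoint from the
-- remaining keys, extends the three accumulators by the three filtered key lists.
theorem classify3_fold (ps : List (String × Int)) (a b c : List String)
    (ha : (a ++ ps.map Prod.fst).Nodup) (hb : (b ++ ps.map Prod.fst).Nodup)
    (hc : (c ++ ps.map Prod.fst).Nodup) :
    ps.foldl
        (fun (acc : List String × List String × List String) it =>
          if it.2 == 3 then (PySem.Set.add acc.1 it.1, acc.2.1, acc.2.2)
          else if it.2 == 1 then (acc.1, PySem.Set.add acc.2.1 it.1, acc.2.2)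
          else (acc.1, acc.2.1, PySem.Set.add acc.2.2 it.1)) (a, b, c)
      = (a ++ (ps.filter (fun p => p.2 == 3)).map Prod.fst,
         b ++ (ps.filter (fun p => !(p.2 == 3) && p.2 == 1)).map Prod.fst,
         c ++ (ps.filter (fun p => !(p.2 == 3) && !(p.2 == 1))).map Prod.fst) := by
  induction ps generalizing a b c with
  | nil => simp
  | cons q t ih =>
    have hmap : (q :: t).map Prod.fst = q.1 :: t.map Prod.fst := rfl
    rw [hmap] at ha hb hc
    have hqa : q.1 ∉ a := fun hm => List.disjoint_of_nodup_append ha hm (by simp)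
    have hqb : q.1 ∉ b := fun hm => List.disjoint_of_nodup_append hb hm (by simp)
    have hqc : q.1 ∉ c := fun hm => List.disjoint_of_nodup_append hc hm (by simp)
    have ha' : ((a ++ [q.1]) ++ t.map Prod.fst).Nodup := by
      rw [List.append_assoc]; simpa using ha
    have hb' : ((b ++ [q.1]) ++ t.map Prod.fst).Nodup := by
      rw [List.append_assoc]; simpa using hb
    have hc' : ((c ++ [q.1]) ++ t.map Prod.fst).Nodup := by
      rw [List.append_assoc]; simpa using hc
    have ha2 : (a ++ t.map Prod.fst).Nodup :=
      List.Nodup.sublist ((List.sublist_cons_self q.1 (t.map Prod.fst)).append_left a) ha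
    have hb2 : (b ++ t.map Prod.fst).Nodup :=
      List.Nodup.sublist ((List.sublist_cons_self q.1 (t.map Prod.fst)).append_left b) hb
    have hc2 : (c ++ t.map Prod.fst).Nodup :=
      List.Nodup.sublist ((List.sublist_cons_self q.1 (t.map Prod.fst)).append_left c) hc
    have hadda : PySem.Set.add a q.1 = a ++ [q.1] := PySem.Set.add_of_not_mem hqa
    have haddb : PySem.Set.add b q.1 = b ++ [q.1] := PySem.Set.add_of_not_mem hqb
    have haddc : PySem.Set.add c q.1 = c ++ [q.1] := PySem.Set.add_of_not_mem hqc
    by_cases h3 : q.2 = 3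
    · have e3 : (q.2 == 3) = true := by simp [h3]
      rw [List.foldl_cons]
      simp only [e3, if_true, hadda]
      rw [ih (a ++ [q.1]) b c ha' hb2 hc2]
      simp [List.filter_cons, e3]
    · have e3 : (q.2 == 3) = false := by simp [h3]
      by_cases h1 : q.2 = 1
      · have e1 : (q.2 == 1) = true := by simp [h1]
        rw [List.foldl_cons]
        simp only [e3, e1, Bool.false_eq_true, if_false, if_true, haddb]
        rw [ih a (b ++ [q.1]) c ha2 hb' hc2]
        simp [List.filter_cons, e3, e1]
      · have e1 : (q.2 == 1) = false := by simp [h1]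
        rw [List.foldl_cons]
        simp only [e3, e1, Bool.false_eq_true, if_false, haddc]
        rw [ih a b (c ++ [q.1]) ha2 hb2 hc']
        simp [List.filter_cons, e3, e1]

-- Assembly: A's three set-algebra results coincide with B's tag classification.
theorem crossref_main (jm : List (String × String)) (manual : List String)
    (hpre : manual.Nodup) : crossref jm manual = crossref_alt jm manual := by
  have hne : normExt = normalize_ext := rfl
  simp only [crossref, crossref_alt, hne]
  have h1 : jm.foldl (fun d kv => PySem.Dict.insert d (normalize_ext kv.1) 1) PySem.Dict.empty
      = PySem.Dict.mk ((PySem.Set.ofList (jm.map (fun kv => normalize_ext kv.1))).map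
          (fun k => (k, (1 : Int)))) := by
    have h := first_loop_items (jm.map (fun kv => normalize_ext kv.1)) []
    simpa [PySem.Set.ofList, PySem.Set.empty, List.foldl_map, PySem.Dict.empty] using h
  rw [h1, second_loop_items _ manual hpre]
  have hitems : ∀ (l : List (String × Int)), (PySem.Dict.mk l).items = l := fun _ => rfl
  rw [hitems]
  set J := PySem.Set.ofList (jm.map (fun kv => normalize_ext kv.1)) with hJdef
  have hJnd : J.Nodup := PySem.Set.nodup_ofList _
  set ps := (List.map (fun k => (k, if List.contains manual k then (3 : Int) else 1)) J
      ++ List.map (fun k => (k, (2 : Int))) (List.filter (fun m => !(List.contains J m)) manual)) with hps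
  have hkeys : ps.map Prod.fst = J ++ List.filter (fun m => !(List.contains J m)) manual := by
    simp [hps, List.map_map, Function.comp_def]
  have hndk : (([] : List String) ++ ps.map Prod.fst).Nodup := by
    rw [List.nil_append, hkeys, List.nodup_append]
    refine ⟨hJnd, hpre.filter _, ?_⟩
    intro x hxJ y hyf hxy
    subst hxy
    have hx := List.of_mem_filter hyf
    simp only [List.contains_eq_mem, Bool.not_eq_true', decide_eq_false_iff_not] at hx
    exact hx hxJ
  rw [classify3_fold ps [] [] [] hndk hndk hndk]
  have c1 : (ps.filter (fun p => p.2 == 3)).map Prod.fst = PySem.Set.inter J manual := by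
    rw [hps, List.filter_append, List.filter_map, List.filter_map]
    have e1 : ∀ k ∈ J, ((fun p : String × Int => p.2 == 3) ∘ (fun k => (k, if List.contains manual k then (3:Int) else 1))) k = List.contains manual k := by
      intro k _; by_cases h : k ∈ manual <;> simp [Function.comp, List.contains_eq_mem, h]
    have e2 : ((fun p : String × Int => p.2 == 3) ∘ (fun k => (k, (2:Int)))) = fun _ => false := by
      funext k; simp [Function.comp]
    rw [List.filter_congr e1, e2]
    simp [List.map_map, Function.comp_def, PySem.Set.inter, PySem.Set.contains, List.contains_eq_mem]
    exact List.filter_congr (fun x _ => by simp [List.contains_eq_mem])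
  have c2 : (ps.filter (fun p => !(p.2 == 3) && p.2 == 1)).map Prod.fst = PySem.Set.diff J manual := by
    rw [hps, List.filter_append, List.filter_map, List.filter_map]
    have e1 : ∀ k ∈ J, ((fun p : String × Int => !(p.2 == 3) && p.2 == 1) ∘ (fun k => (k, if List.contains manual k then (3:Int) else 1))) k = !List.contains manual k := by
      intro k _; by_cases h : k ∈ manual <;> simp [Function.comp, List.contains_eq_mem, h]
    have e2 : ((fun p : String × Int => !(p.2 == 3) && p.2 == 1) ∘ (fun k => (k, (2:Int)))) = fun _ => false := by
      funext k; simp [Function.comp]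
    rw [List.filter_congr e1, e2]
    simp [List.map_map, Function.comp_def, PySem.Set.diff, PySem.Set.contains, List.contains_eq_mem]
  have c3 : (ps.filter (fun p => !(p.2 == 3) && !(p.2 == 1))).map Prod.fst = PySem.Set.diff manual J := by
    rw [hps, List.filter_append, List.filter_map, List.filter_map]
    have e1 : ∀ k ∈ J, ((fun p : String × Int => !(p.2 == 3) && !(p.2 == 1)) ∘ (fun k => (k, if List.contains manual k then (3:Int) else 1))) k = false := by
      intro k _; by_cases h : k ∈ manual <;> simp [Function.comp, List.contains_eq_mem, h]
    have e2 : ((fun p : String × Int => !(p.2 == 3) && !(p.2 == 1)) ∘ (fun k => (k, (2:Int)))) = fun _ => true := by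
      funext k; simp [Function.comp]
    rw [List.filter_congr e1, e2]
    simp [List.map_map, Function.comp_def, PySem.Set.diff, PySem.Set.contains, List.contains_eq_mem]
  simp [c1, c2, c3]

-- ===== VERDICT (by name: the statement is the Claim_ definition above) =====
theorem crossref_spec : Claim_equal_crossref := by
  intro jm manual _ hpre
  unfold Spec_crossref
  exact crossref_main jm manual hpre
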